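-- pv_equiv track=rewrite | github.com/YoManFeed/course_work | tests.py | axes_of_symmetry
-- ===== SOURCE A (Python) =====
-- def axes_of_symmetry(code):
--     axes = []
--     sum = 0
--     left_index = 0
--     for i, digit in enumerate(code):
--         sum += digit
--         if sum == 0:
--             axes.append((left_index + i) // 2 + 1)
--             left_index = i+1
--     return axes
-- ===== SOURCE B (Python) =====
-- def axes_of_symmetry(code):
--     # pass 1: materialize running prefix sums
--     prefix = []
--     s = 0
--     for d in code:
--         s += d
--         prefix.append(s)
--     # pass 2: indices where the prefix sum returns to zero
--     zeros = [i for i, p in enumerate(prefix) if p == 0]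
--     # pass 3: midpoint of each zero-delimited segment
--     starts = [0] + [z + 1 for z in zeros]
--     return [(a + z) // 2 + 1 for a, z in zip(starts, zeros)]
-- ===== Notes on version B (the rewrite author's own statement) =====
-- stated objective: simpler
-- what changed: Replaces A's single interleaved loop (running sum, left_index and midpoint appends in one pass) by three separate stages: materialize the prefix sums, collect the indices where they hit zero, then compute each segment midpoint from consecutive zero indices.
import Mathlib
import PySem

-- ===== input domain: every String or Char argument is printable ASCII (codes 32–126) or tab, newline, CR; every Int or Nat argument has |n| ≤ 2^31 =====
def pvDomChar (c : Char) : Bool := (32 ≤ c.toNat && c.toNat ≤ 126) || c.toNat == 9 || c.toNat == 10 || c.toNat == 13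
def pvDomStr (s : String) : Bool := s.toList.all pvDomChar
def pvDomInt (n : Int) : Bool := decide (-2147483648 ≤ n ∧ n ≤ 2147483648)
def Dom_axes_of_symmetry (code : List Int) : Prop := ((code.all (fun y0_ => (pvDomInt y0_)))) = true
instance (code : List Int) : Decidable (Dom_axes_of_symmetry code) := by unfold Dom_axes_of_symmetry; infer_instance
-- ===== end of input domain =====

-- B replaces A's single interleaved loop by three separate passes (prefix sums, zero
-- indices, segment midpoints); objective: simpler decomposition, same O(n) cost.

-- ===== PORT A =====
-- A's loop: running sum, left_index, append midpoint when the sum hits zero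
def pvAxesLoop (code : List Int) (i : Int) (sum : Int) (left_index : Int) : List Int :=
  match code with
  | [] => []
  | digit :: rest =>
    let sum' := sum + digit
    if sum' = 0 then
      (PySem.Int.floordiv (left_index + i) 2 + 1) :: pvAxesLoop rest (i + 1) sum' (i + 1)
    else
      pvAxesLoop rest (i + 1) sum' left_index

def axes_of_symmetry (code : List Int) : List Int :=
  pvAxesLoop code 0 0 0

-- ===== PORT B =====
-- pass 1 of Source B: the running prefix sums
def pvPrefixSums (code : List Int) (s : Int) : List Int :=
  match code with
  | [] => []
  | d :: rest => (s + d) :: pvPrefixSums rest (s + d)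

def axes_of_symmetry_alt (code : List Int) : List Int :=
  let pfx := pvPrefixSums code 0
  let zeros := ((PySem.List.enumerate pfx 0).filter (fun p => p.2 = 0)).map (fun p => p.1)
  let starts := 0 :: zeros.map (fun z => z + 1)
  (starts.zip zeros).map (fun p => PySem.Int.floordiv (p.1 + p.2) 2 + 1)

-- ===== PRECONDITION & SPEC =====
def Spec_axes_of_symmetry (code : List Int) (out : List Int) : Prop := out = axes_of_symmetry_alt code
instance (code : List Int) (out : List Int) : Decidable (Spec_axes_of_symmetry code out) := by unfold Spec_axes_of_symmetry; infer_instance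

-- ===== CLAIM (what is proved, stated in full; the proofs are below) =====
def Claim_equal_axes_of_symmetry : Prop := ∀ (code : List Int), Dom_axes_of_symmetry code → Spec_axes_of_symmetry code (axes_of_symmetry code)

-- ===== LEMMAS AND PROOFS =====

-- indices (counting from k) at which the running sum (starting from s) hits zero
def pvZerosFrom (code : List Int) (k : Int) (s : Int) : List Int :=
  match code with
  | [] => []
  | d :: rest =>
    if s + d = 0 then k :: pvZerosFrom rest (k + 1) (s + d)
    else pvZerosFrom rest (k + 1) (s + d)

-- midpoints of the segments delimited by the zero indices
def pvMids (zeros : List Int) (prev : Int) : List Int :=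
  match zeros with
  | [] => []
  | z :: rest => (PySem.Int.floordiv (prev + z) 2 + 1) :: pvMids rest (z + 1)

theorem pvAxesLoop_eq_mids (code : List Int) :
    ∀ (i s li : Int), pvAxesLoop code i s li = pvMids (pvZerosFrom code i s) li := by
  induction code with
  | nil => intro i s li; rfl
  | cons d rest ih =>
    intro i s li
    by_cases h : s + d = 0 <;> simp [pvAxesLoop, pvZerosFrom, h, pvMids, ih]

theorem pvZeros_eq (code : List Int) :
    ∀ (k s : Int),
      ((PySem.List.enumerate (pvPrefixSums code s) k).filter (fun p => p.2 = 0)).map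
          (fun p => p.1) = pvZerosFrom code k s := by
  induction code with
  | nil => intro k s; rfl
  | cons d rest ih =>
    intro k s
    by_cases h : s + d = 0 <;>
      simp [pvPrefixSums, PySem.List.enumerate_cons, pvZerosFrom, h, ih]

theorem pvZip_eq_mids (zeros : List Int) :
    ∀ (prev : Int),
      ((prev :: zeros.map (fun z => z + 1)).zip zeros).map
          (fun p => PySem.Int.floordiv (p.1 + p.2) 2 + 1) = pvMids zeros prev := by
  induction zeros with
  | nil => intro prev; rfl
  | cons z rest ih =>
    intro prev
    simp only [List.map_cons, List.zip_cons_cons, pvMids]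
    exact congrArg _ (ih (z + 1))

-- ===== VERDICT (by name: the statement is the Claim_ definition above) =====
theorem axes_of_symmetry_spec : Claim_equal_axes_of_symmetry := by
  intro code _
  show axes_of_symmetry code = axes_of_symmetry_alt code
  rw [axes_of_symmetry, axes_of_symmetry_alt, pvAxesLoop_eq_mids, pvZeros_eq, pvZip_eq_mids]
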